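-- pv_equiv track=rewrite | github.com/pyrometheous/DnD-5e-Character-Generator | scripts/party_balance.py | _get_missing_capabilities
-- ===== SOURCE A (Python) =====
-- def _get_missing_capabilities(
--     selected_classes: list[str],
--     capability_map: dict[str, set[str]],
--     required_capabilities: set[str],
-- ) -> set[str]:
--     covered_capabilities: set[str] = set()
--     for class_name in selected_classes:
--         covered_capabilities.update(capability_map.get(class_name, set()))
--     return required_capabilities - covered_capabilities
-- ===== SOURCE B (Python) =====
-- def _get_missing_capabilities(
--     selected_classes: list[str],
--     capability_map: dict[str, set[str]],
--     required_capabilities: set[str],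
-- ) -> set[str]:
--     def is_covered(cap: str) -> bool:
--         for class_name in selected_classes:
--             if cap in capability_map.get(class_name, set()):
--                 return True
--         return False
--
--     missing: set[str] = set()
--     for cap in required_capabilities:
--         if not is_covered(cap):
--             missing.add(cap)
--     return missing
-- ===== Notes on version B (the rewrite author's own statement) =====
-- stated objective: alternative
-- what changed: Instead of accumulating the union of all covered capabilities and subtracting it, B decides coverage per required capability: an inner helper scans the selected classes until one covers the capability, and an outer loop collects the uncovered ones; no union set is ever built.
import Mathlib
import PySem

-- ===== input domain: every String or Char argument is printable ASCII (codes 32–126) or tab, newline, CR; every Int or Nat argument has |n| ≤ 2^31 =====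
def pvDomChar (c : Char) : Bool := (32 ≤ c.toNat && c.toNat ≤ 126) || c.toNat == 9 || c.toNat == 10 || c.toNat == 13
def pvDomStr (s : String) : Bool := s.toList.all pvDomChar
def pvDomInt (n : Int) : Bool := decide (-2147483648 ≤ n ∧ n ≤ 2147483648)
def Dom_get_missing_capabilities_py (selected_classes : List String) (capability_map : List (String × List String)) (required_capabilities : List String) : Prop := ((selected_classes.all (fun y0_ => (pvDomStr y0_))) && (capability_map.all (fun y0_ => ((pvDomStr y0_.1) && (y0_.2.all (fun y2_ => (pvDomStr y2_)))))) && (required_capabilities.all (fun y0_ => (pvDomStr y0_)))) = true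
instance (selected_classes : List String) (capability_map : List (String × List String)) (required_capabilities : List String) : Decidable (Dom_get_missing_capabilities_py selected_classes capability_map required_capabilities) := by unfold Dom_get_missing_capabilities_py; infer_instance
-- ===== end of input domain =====

-- B decides coverage per required capability with an inner class scan and collects the uncovered ones, instead of building the union of covered capabilities and subtracting it; return value only, no arguments are mutated.
-- ===== PORT A =====
def get_missing_capabilities_py (selected_classes : List String) (capability_map : List (String × List String)) (required_capabilities : List String) : List String :=
  let covered_capabilities : PySem.Set String :=
    selected_classes.foldl
      (fun covered class_name => PySem.Set.update covered (PySem.Dict.getD (PySem.Dict.ofList capability_map) class_name []))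
      PySem.Set.empty
  PySem.Set.diff required_capabilities covered_capabilities

-- ===== PORT B =====
-- inner helper 'is_covered': scan selected classes until one covers the capability
def pvIsCovered (capability_map : List (String × List String)) (cap : String) : List String → Bool
  | [] => false
  | class_name :: rest =>
    if (PySem.Dict.getD (PySem.Dict.ofList capability_map) class_name []).contains cap then true
    else pvIsCovered capability_map cap rest

-- outer loop over required capabilities, adding each uncovered one to 'missing'
def pvCollectMissing (capability_map : List (String × List String)) (selected_classes : List String) :
    PySem.Set String → List String → List String
  | missing, [] => missing
  | missing, cap :: rest =>
    pvCollectMissing capability_map selected_classes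
      (if pvIsCovered capability_map cap selected_classes then missing else PySem.Set.add missing cap) rest

def get_missing_capabilities_py_alt (selected_classes : List String) (capability_map : List (String × List String)) (required_capabilities : List String) : List String :=
  pvCollectMissing capability_map selected_classes PySem.Set.empty required_capabilities

-- ===== PRECONDITION & SPEC =====
-- required_capabilities is a Python set, so under the type convention it is a list of DISTINCT elements; Pre_ states exactly that (A is total otherwise).
def Pre_get_missing_capabilities_py (selected_classes : List String) (capability_map : List (String × List String)) (required_capabilities : List String) : Prop :=
  required_capabilities.Nodup
instance (selected_classes : List String) (capability_map : List (String × List String)) (required_capabilities : List String) : Decidable (Pre_get_missing_capabilities_py selected_classes capability_map required_capabilities) := by unfold Pre_get_missing_capabilities_py; infer_instance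
def pvWitness_get_missing_capabilities_py : List String × (List (String × List String)) × List String :=
  (["wizard", "cleric"], [("wizard", ["arcana", "utility"]), ("cleric", ["healing"])], ["healing", "stealth", "arcana"])
def Spec_get_missing_capabilities_py (selected_classes : List String) (capability_map : List (String × List String)) (required_capabilities : List String) (out : List String) : Prop := out = get_missing_capabilities_py_alt selected_classes capability_map required_capabilities
instance (selected_classes : List String) (capability_map : List (String × List String)) (required_capabilities : List String) (out : List String) : Decidable (Spec_get_missing_capabilities_py selected_classes capability_map required_capabilities out) := by unfold Spec_get_missing_capabilities_py; infer_instance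

-- ===== CLAIM (what is proved, stated in full; the proofs are below) =====
def Claim_equal_get_missing_capabilities_py : Prop := ∀ (selected_classes : List String) (capability_map : List (String × List String)) (required_capabilities : List String), Dom_get_missing_capabilities_py selected_classes capability_map required_capabilities → Pre_get_missing_capabilities_py selected_classes capability_map required_capabilities → Spec_get_missing_capabilities_py selected_classes capability_map required_capabilities (get_missing_capabilities_py selected_classes capability_map required_capabilities)

-- ===== LEMMAS AND PROOFS =====
-- Membership in A's accumulated covered set: y is covered iff some selected class's capability list contains it.
theorem mem_covered_fold (capability_map : List (String × List String)) (sc : List String)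
    (acc : List String) (y : String) :
    (y ∈ sc.foldl (fun covered c => PySem.Set.update covered (PySem.Dict.getD (PySem.Dict.ofList capability_map) c [])) acc)
      ↔ (y ∈ acc ∨ ∃ c ∈ sc, y ∈ PySem.Dict.getD (PySem.Dict.ofList capability_map) c []) := by
  induction sc generalizing acc with
  | nil => simp
  | cons c cs ih =>
    simp [List.foldl_cons, ih, PySem.Set.mem_update]
    tauto

-- B's inner scan is true iff some selected class covers the capability.
theorem isCovered_iff (capability_map : List (String × List String)) (cap : String) (sc : List String) :
    pvIsCovered capability_map cap sc = true
      ↔ ∃ c ∈ sc, cap ∈ PySem.Dict.getD (PySem.Dict.ofList capability_map) c [] := by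
  induction sc with
  | nil => simp [pvIsCovered]
  | cons c cs ih =>
    rw [pvIsCovered]
    by_cases h : (PySem.Dict.getD (PySem.Dict.ofList capability_map) c []).contains cap = true
    · have hc : cap ∈ PySem.Dict.getD (PySem.Dict.ofList capability_map) c [] := by simpa using h
      rw [if_pos h]
      exact ⟨fun _ => ⟨c, by simp, hc⟩, fun _ => rfl⟩
    · have hc : cap ∉ PySem.Dict.getD (PySem.Dict.ofList capability_map) c [] := by simpa using h
      rw [if_neg h, ih]
      simp only [List.mem_cons]
      constructor
      · rintro ⟨c', hc', hm⟩; exact ⟨c', Or.inr hc', hm⟩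
      · rintro ⟨c', hc' | hc', hm⟩
        · exact absurd (hc' ▸ hm) hc
        · exact ⟨c', hc', hm⟩

-- B's outer loop, on a duplicate-free list disjoint from the accumulator, appends the uncovered elements.
theorem collect_eq_append_filter (capability_map : List (String × List String)) (sc : List String)
    (l acc : List String) (hnd : l.Nodup) (hdis : ∀ x ∈ l, x ∉ acc) :
    pvCollectMissing capability_map sc acc l
      = acc ++ l.filter (fun cap => !pvIsCovered capability_map cap sc) := by
  induction l generalizing acc with
  | nil => simp [pvCollectMissing]
  | cons cap rest ih =>
    have hndr : rest.Nodup := hnd.of_cons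
    have hcapacc : cap ∉ acc := hdis cap (by simp)
    by_cases h : pvIsCovered capability_map cap sc
    · rw [pvCollectMissing, if_pos h,
        ih acc hndr (fun x hx => hdis x (List.mem_cons_of_mem _ hx))]
      simp [h]
    · rw [pvCollectMissing, if_neg h, PySem.Set.add_of_not_mem hcapacc,
        ih (acc ++ [cap]) hndr (fun x hx => by
          simp only [List.mem_append, List.mem_singleton]
          rintro (hx' | rfl)
          · exact hdis x (List.mem_cons_of_mem _ hx) hx'
          · exact (List.nodup_cons.mp hnd).1 hx)]
      simp [h]

-- ===== VERDICT =====
theorem get_missing_capabilities_py_spec : Claim_equal_get_missing_capabilities_py := by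
  intro sc cm rc _ hpre
  unfold Spec_get_missing_capabilities_py get_missing_capabilities_py get_missing_capabilities_py_alt
  rw [collect_eq_append_filter cm sc rc PySem.Set.empty hpre (by simp [PySem.Set.empty])]
  simp only [PySem.Set.empty, List.nil_append, PySem.Set.diff]
  apply List.filter_congr
  intro x _
  have hiff := isCovered_iff cm x sc
  by_cases hp : ∃ c ∈ sc, x ∈ PySem.Dict.getD (PySem.Dict.ofList cm) c []
  · simp [mem_covered_fold, hp, hiff.mpr hp]
  · have hfalse : pvIsCovered cm x sc = false :=
      Bool.eq_false_iff.mpr (fun ht => hp (hiff.mp ht))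
    simp [mem_covered_fold, hp, hfalse]
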